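-- pv_equiv track=rewrite | github.com/DoroteaSerrelli/BachelorThesis_LLM_multi-agent_system | Code/utility_function.py | get_set_number_solutions
-- ===== SOURCE A (Python) =====
-- def get_set_number_solutions(placeholder, AGENTS_NO):
--     """
--         Returns a list of agent indices excluding the one specified by `placeholder`.
--
--         Parameters:
--         - placeholder (int): The index of the agent to exclude.
--         - AGENTS_NO (int): Total number of agents.
--
--         Returns:
--         - A list of agent indices excluding the one specified.
--
--         Useful for peer comparison or voting among agents.
--     """
--
--     list_local = [None] * AGENTS_NO
--
--     for i in range(0, AGENTS_NO):
--         list_local[i] = i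
--
--     for var in list_local:
--         if var == int(placeholder):
--             list_local.remove(var)
--             break
--
--     return list_local
-- ===== SOURCE B (Python) =====
-- def get_set_number_solutions(placeholder, AGENTS_NO):
--     p = int(placeholder)
--     return [i for i in range(AGENTS_NO) if i != p]
-- ===== Notes on version B (the rewrite author's own statement) =====
-- stated objective: simpler
-- what changed: Replaces the build-then-scan-and-remove two-pass structure (allocate [None]*n, fill it, then scan for the placeholder and remove it with list.remove) with a single filtering pass over range that omits the placeholder index.
import Mathlib
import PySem

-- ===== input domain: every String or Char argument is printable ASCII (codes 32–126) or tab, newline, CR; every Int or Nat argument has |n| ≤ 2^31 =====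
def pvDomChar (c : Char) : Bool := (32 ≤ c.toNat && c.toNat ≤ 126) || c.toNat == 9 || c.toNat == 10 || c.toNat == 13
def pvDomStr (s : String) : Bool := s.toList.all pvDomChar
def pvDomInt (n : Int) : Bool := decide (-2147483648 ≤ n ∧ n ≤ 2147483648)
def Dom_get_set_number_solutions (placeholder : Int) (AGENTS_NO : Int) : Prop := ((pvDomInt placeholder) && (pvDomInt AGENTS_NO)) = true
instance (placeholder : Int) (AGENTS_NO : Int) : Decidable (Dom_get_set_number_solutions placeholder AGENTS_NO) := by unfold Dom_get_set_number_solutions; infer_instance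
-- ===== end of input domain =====

-- B replaces A's build-then-scan-and-remove two-pass structure with a single filtering pass (simpler; same cost).

-- ===== PORT A =====
-- A's second loop: iterate over the list; at the first element equal to p, remove it
-- (list.remove deletes the first occurrence, which is exactly the element being scanned) and break.
def pvScanRemove (p : Int) : List Int → List Int
  | [] => []
  | x :: xs => if x == p then xs else x :: pvScanRemove p xs

def get_set_number_solutions (placeholder : Int) (AGENTS_NO : Int) : List Int :=
  -- list_local = [None]*AGENTS_NO then list_local[i] = i for i in range(AGENTS_NO):
  -- after the first loop list_local = list(range(AGENTS_NO)).
  let list_local := PySem.List.pyRange 0 AGENTS_NO 1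
  pvScanRemove placeholder list_local

-- ===== PORT B =====
def get_set_number_solutions_alt (placeholder : Int) (AGENTS_NO : Int) : List Int :=
  (PySem.List.pyRange 0 AGENTS_NO 1).filter (fun i => i != placeholder)

-- ===== PRECONDITION & SPEC =====
def Spec_get_set_number_solutions (placeholder : Int) (AGENTS_NO : Int) (out : List Int) : Prop := out = get_set_number_solutions_alt placeholder AGENTS_NO
instance (placeholder : Int) (AGENTS_NO : Int) (out : List Int) : Decidable (Spec_get_set_number_solutions placeholder AGENTS_NO out) := by unfold Spec_get_set_number_solutions; infer_instance

-- ===== CLAIM (what is proved, stated in full; the proofs are below) =====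
def Claim_equal_get_set_number_solutions : Prop := ∀ (placeholder : Int) (AGENTS_NO : Int), Dom_get_set_number_solutions placeholder AGENTS_NO → Spec_get_set_number_solutions placeholder AGENTS_NO (get_set_number_solutions placeholder AGENTS_NO)

-- ===== LEMMAS AND PROOFS =====
-- On a duplicate-free list, removing the first occurrence of p equals filtering p out.
theorem pvScanRemove_eq_filter (p : Int) (l : List Int) (h : l.Nodup) :
    pvScanRemove p l = l.filter (fun i => i != p) := by
  induction l with
  | nil => rfl
  | cons x xs ih =>
    rcases List.nodup_cons.mp h with ⟨hx, hxs⟩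
    by_cases hxp : x = p
    · subst hxp
      simp [pvScanRemove]
      exact (List.filter_eq_self.mpr (fun a ha => by
        simp only [bne_iff_ne, ne_eq]; exact fun hax => hx (hax ▸ ha))).symm
    · simp [pvScanRemove, hxp, ih hxs]

-- ===== VERDICT (by name: the statement is the Claim_ definition above) =====
theorem get_set_number_solutions_spec : Claim_equal_get_set_number_solutions := by
  intro p n _
  unfold Spec_get_set_number_solutions get_set_number_solutions get_set_number_solutions_alt
  exact pvScanRemove_eq_filter p _ (PySem.List.nodup_pyRange_one 0 n)
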